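-- pv_equiv track=rewrite | github.com/remdui/MultivariateNormativeModeling | scripts/data/hbn/merge_data.py | get_subset_features
-- ===== SOURCE A (Python) =====
-- AREA_KEY = "surfarea"  # was "area"
--
-- VOLUME_KEY = "vol"  # was "volume"
--
-- THICKNESS_KEY = "thickavg"  # was "thickness"
--
-- def get_subset_features(features_of_interest):
--     """Get the subset features for the data using the defined keywords."""
--     subsets = {
--         AREA_KEY: [col for col in features_of_interest if AREA_KEY in col.lower()],
--         VOLUME_KEY: [col for col in features_of_interest if VOLUME_KEY in col.lower()],
--         THICKNESS_KEY: [
--             col for col in features_of_interest if THICKNESS_KEY in col.lower()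
--         ],
--     }
--     return subsets
-- ===== SOURCE B (Python) =====
-- AREA_KEY = "surfarea"
-- VOLUME_KEY = "vol"
-- THICKNESS_KEY = "thickavg"
--
-- def get_subset_features(features_of_interest):
--     """Single pass: lowercase each column once, append to each matching bucket."""
--     subsets = {AREA_KEY: [], VOLUME_KEY: [], THICKNESS_KEY: []}
--     for col in features_of_interest:
--         lc = col.lower()
--         if AREA_KEY in lc:
--             subsets[AREA_KEY].append(col)
--         if VOLUME_KEY in lc:
--             subsets[VOLUME_KEY].append(col)
--         if THICKNESS_KEY in lc:
--             subsets[THICKNESS_KEY].append(col)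
--     return subsets
-- ===== Notes on version B (the rewrite author's own statement) =====
-- stated objective: simpler
-- what changed: Replaces three independent full scans (one list comprehension per keyword) with a single pass over the features that lowercases each name once and appends it to every matching bucket.
import Mathlib
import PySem

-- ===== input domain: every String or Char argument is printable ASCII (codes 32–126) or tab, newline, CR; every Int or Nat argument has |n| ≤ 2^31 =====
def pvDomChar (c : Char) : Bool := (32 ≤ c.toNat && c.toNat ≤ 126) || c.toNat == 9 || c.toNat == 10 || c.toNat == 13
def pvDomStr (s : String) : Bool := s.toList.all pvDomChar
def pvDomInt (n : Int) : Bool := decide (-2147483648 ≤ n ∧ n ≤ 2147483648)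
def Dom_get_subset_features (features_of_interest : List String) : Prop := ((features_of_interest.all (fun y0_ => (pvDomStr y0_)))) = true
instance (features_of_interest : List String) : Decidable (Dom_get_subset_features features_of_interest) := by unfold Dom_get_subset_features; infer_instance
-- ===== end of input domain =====

-- B replaces A's three independent full scans with one pass that lowercases each name once; objective: simpler.

-- ===== PORT A =====
-- A: a dict of three list comprehensions, each a full scan of the input.
def get_subset_features (features_of_interest : List String) : List (String × List String) :=
  [ ("surfarea", features_of_interest.filter (fun col => PySem.Str.isIn "surfarea" (PySem.Str.lower col))),
    ("vol", features_of_interest.filter (fun col => PySem.Str.isIn "vol" (PySem.Str.lower col))),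
    ("thickavg", features_of_interest.filter (fun col => PySem.Str.isIn "thickavg" (PySem.Str.lower col))) ]

-- ===== PORT B =====
-- B: one fold over the input; state = the three buckets; each column appended to every matching bucket.
def get_subset_features_alt (features_of_interest : List String) : List (String × List String) :=
  let st := features_of_interest.foldl
    (fun (acc : List String × List String × List String) col =>
      let lc := PySem.Str.lower col
      let a := if PySem.Str.isIn "surfarea" lc then acc.1 ++ [col] else acc.1
      let v := if PySem.Str.isIn "vol" lc then acc.2.1 ++ [col] else acc.2.1
      let t := if PySem.Str.isIn "thickavg" lc then acc.2.2 ++ [col] else acc.2.2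
      (a, v, t))
    ([], [], [])
  [("surfarea", st.1), ("vol", st.2.1), ("thickavg", st.2.2)]

-- ===== PRECONDITION & SPEC =====
def Spec_get_subset_features (features_of_interest : List String) (out : List (String × List String)) : Prop := out = get_subset_features_alt features_of_interest
instance (features_of_interest : List String) (out : List (String × List String)) : Decidable (Spec_get_subset_features features_of_interest out) := by unfold Spec_get_subset_features; infer_instance

-- ===== CLAIM (what is proved, stated in full; the proofs are below) =====
def Claim_equal_get_subset_features : Prop := ∀ (features_of_interest : List String), Dom_get_subset_features features_of_interest → Spec_get_subset_features features_of_interest (get_subset_features features_of_interest)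

-- ===== LEMMAS AND PROOFS =====

-- Invariant of B's fold: it appends the three filtered sublists to the starting buckets.
theorem foldl_buckets (xs : List String) (a v t : List String) :
    xs.foldl
      (fun (acc : List String × List String × List String) col =>
        let lc := PySem.Str.lower col
        let a := if PySem.Str.isIn "surfarea" lc then acc.1 ++ [col] else acc.1
        let v := if PySem.Str.isIn "vol" lc then acc.2.1 ++ [col] else acc.2.1
        let t := if PySem.Str.isIn "thickavg" lc then acc.2.2 ++ [col] else acc.2.2
        (a, v, t))
      (a, v, t)
    = (a ++ xs.filter (fun col => PySem.Str.isIn "surfarea" (PySem.Str.lower col)),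
       v ++ xs.filter (fun col => PySem.Str.isIn "vol" (PySem.Str.lower col)),
       t ++ xs.filter (fun col => PySem.Str.isIn "thickavg" (PySem.Str.lower col))) := by
  induction xs generalizing a v t with
  | nil => simp
  | cons x xs ih =>
    simp only [List.foldl_cons, List.filter_cons]
    rw [ih]
    simp only [PySem.Str.isIn, PySem.Str.lower]
    split_ifs <;> simp_all

-- ===== VERDICT (by name: the statement is the Claim_ definition above) =====
theorem get_subset_features_spec : Claim_equal_get_subset_features := by
  intro xs _
  unfold Spec_get_subset_features get_subset_features get_subset_features_alt
  rw [foldl_buckets]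
  simp
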